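-- pv_equiv track=rewrite | github.com/implse/Code_Challenges | SpaceX/launchSequenceChecker.py | launchSequenceChecker
-- ===== SOURCE A (Python) =====
-- def launchSequenceChecker(systemNames, stepNumbers):
--     sequence = dict()
--     for i in range(len(systemNames)):
--         systemId = systemNames[i]
--         stepNumber = stepNumbers[i]
--         if systemId not in sequence:
--             sequence[systemId] = [stepNumber]
--         elif stepNumber <= sequence[systemId][-1]:
--             return False
--         else:
--             sequence[systemId].append(stepNumber)
--     return True
-- ===== SOURCE B (Python) =====
-- def strictlyIncreasing(steps):
--     for prev, cur in zip(steps, steps[1:]):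
--         if cur <= prev:
--             return False
--     return True
--
--
-- def launchSequenceChecker(systemNames, stepNumbers):
--     groups = {}
--     for i in range(len(systemNames)):
--         name = systemNames[i]
--         groups[name] = groups.get(name, []) + [stepNumbers[i]]
--     return all(strictlyIncreasing(steps) for steps in groups.values())
-- ===== Notes on version B (the rewrite author's own statement) =====
-- stated objective: alternative
-- what changed: A interleaves grouping and checking in one incremental pass with early exit on the dict's last element; B decomposes into two passes: build the per-system step lists first, then check every group's consecutive pairs for strict increase.
-- outside the precondition, e.g. on launchSequenceChecker(['a', 'a', 'b'], [5, 3]): A returns False, B raises IndexError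
import Mathlib
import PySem

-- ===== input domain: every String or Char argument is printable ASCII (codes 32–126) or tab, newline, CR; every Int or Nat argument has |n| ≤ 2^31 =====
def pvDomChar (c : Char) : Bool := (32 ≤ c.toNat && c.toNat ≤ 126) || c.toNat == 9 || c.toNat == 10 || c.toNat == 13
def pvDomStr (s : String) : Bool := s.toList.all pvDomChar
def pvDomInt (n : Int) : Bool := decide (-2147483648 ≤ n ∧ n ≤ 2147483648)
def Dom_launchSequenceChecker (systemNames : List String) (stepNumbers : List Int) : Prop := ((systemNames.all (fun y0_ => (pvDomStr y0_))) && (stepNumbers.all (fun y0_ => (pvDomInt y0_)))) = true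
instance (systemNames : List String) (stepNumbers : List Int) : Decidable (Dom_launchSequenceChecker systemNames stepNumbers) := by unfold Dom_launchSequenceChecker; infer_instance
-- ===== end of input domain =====

-- B re-decomposes A's single incremental pass into two passes: first build the per-system
-- step lists, then check each list for strict increase (objective: alternative, same cost).

-- ===== PORT A =====
-- The i-loop of A, carrying the dict `sequence`; the `none` branch marks Python's
-- IndexError on stepNumbers[i], which Pre_ excludes.
def lscLoopA (systemNames : List String) (stepNumbers : List Int) (i : Nat)
    (sequence : PySem.Dict String (List Int)) : Bool :=
  if h : i < systemNames.length then
    let systemId := systemNames[i]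
    match PySem.List.pyGet? stepNumbers (i : Int) with
    | none => false      -- IndexError; outside Pre_
    | some stepNumber =>
      match sequence.get? systemId with
      | none => lscLoopA systemNames stepNumbers (i+1) (sequence.insert systemId [stepNumber])
      | some l =>
        if stepNumber ≤ PySem.List.pyGetD l (-1) 0 then false   -- sequence[systemId][-1]; l is never []
        else lscLoopA systemNames stepNumbers (i+1) (sequence.insert systemId (l ++ [stepNumber]))
  else true
termination_by systemNames.length - i

def launchSequenceChecker (systemNames : List String) (stepNumbers : List Int) : Bool :=
  lscLoopA systemNames stepNumbers 0 PySem.Dict.empty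

-- ===== PORT B =====
-- helper strictlyIncreasing(steps): the zip(steps, steps[1:]) loop
def lscStrictInc (steps : List Int) : Bool :=
  (steps.zip steps.tail).all (fun pc => !(pc.2 ≤ pc.1))

-- first pass of B: groups[name] = groups.get(name, []) + [stepNumbers[i]]
def lscBuild (systemNames : List String) (stepNumbers : List Int) (i : Nat)
    (groups : PySem.Dict String (List Int)) : PySem.Dict String (List Int) :=
  if h : i < systemNames.length then
    let name := systemNames[i]
    match PySem.List.pyGet? stepNumbers (i : Int) with
    | none => groups     -- IndexError; outside Pre_
    | some sn => lscBuild systemNames stepNumbers (i+1) (groups.insert name (groups.getD name [] ++ [sn]))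
  else groups
termination_by systemNames.length - i

def launchSequenceChecker_alt (systemNames : List String) (stepNumbers : List Int) : Bool :=
  (lscBuild systemNames stepNumbers 0 PySem.Dict.empty).values.all lscStrictInc

-- ===== PRECONDITION & SPEC =====
-- Pre_ excludes stepNumbers shorter than systemNames: there A raises IndexError
-- (or, when a violation happens to precede the missing index, returns False early),
-- while B's build pass always raises IndexError on such input.
def Pre_launchSequenceChecker (systemNames : List String) (stepNumbers : List Int) : Prop :=
  systemNames.length ≤ stepNumbers.length
instance (systemNames : List String) (stepNumbers : List Int) : Decidable (Pre_launchSequenceChecker systemNames stepNumbers) := by unfold Pre_launchSequenceChecker; infer_instance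

def pvWitness_launchSequenceChecker : List String × List Int :=
  (["fuel", "nav", "fuel"], [1, 5, 2])

def Spec_launchSequenceChecker (systemNames : List String) (stepNumbers : List Int) (out : Bool) : Prop := out = launchSequenceChecker_alt systemNames stepNumbers
instance (systemNames : List String) (stepNumbers : List Int) (out : Bool) : Decidable (Spec_launchSequenceChecker systemNames stepNumbers out) := by unfold Spec_launchSequenceChecker; infer_instance

-- ===== CLAIM (what is proved, stated in full; the proofs are below) =====
def Claim_equal_launchSequenceChecker : Prop := ∀ (systemNames : List String) (stepNumbers : List Int), Dom_launchSequenceChecker systemNames stepNumbers → Pre_launchSequenceChecker systemNames stepNumbers → Spec_launchSequenceChecker systemNames stepNumbers (launchSequenceChecker systemNames stepNumbers)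

-- ===== LEMMAS AND PROOFS =====

-- A's loop, re-expressed on the list of (name, step) pairs
def lscPairsA : List (String × Int) → PySem.Dict String (List Int) → Bool
  | [], _ => true
  | (k, v) :: ps, d =>
    match d.get? k with
    | none => lscPairsA ps (d.insert k [v])
    | some l =>
      if v ≤ PySem.List.pyGetD l (-1) 0 then false
      else lscPairsA ps (d.insert k (l ++ [v]))

-- B's build step on one pair
def lscStepB (g : PySem.Dict String (List Int)) (p : String × Int) : PySem.Dict String (List Int) :=
  g.insert p.1 (g.getD p.1 [] ++ [p.2])

theorem lscLoopA_eq_pairs (systemNames : List String) (stepNumbers : List Int)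
    (hlen : systemNames.length ≤ stepNumbers.length) (i : Nat)
    (d : PySem.Dict String (List Int)) :
    lscLoopA systemNames stepNumbers i d =
      lscPairsA ((systemNames.drop i).zip (stepNumbers.drop i)) d := by
  rw [lscLoopA]
  split
  · rename_i h
    have hi2 : i < stepNumbers.length := lt_of_lt_of_le h hlen
    have hget : PySem.List.pyGet? stepNumbers (i : Int) = some stepNumbers[i] := by
      simp [pysem, hi2]
    rw [hget,
        show systemNames.drop i = systemNames[i] :: systemNames.drop (i+1) from
          (List.getElem_cons_drop h).symm,
        show stepNumbers.drop i = stepNumbers[i] :: stepNumbers.drop (i+1) from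
          (List.getElem_cons_drop hi2).symm,
        List.zip_cons_cons, lscPairsA]
    cases hd : d.get? systemNames[i] with
    | none =>
      simp only [hd]
      exact lscLoopA_eq_pairs systemNames stepNumbers hlen (i+1) _
    | some l =>
      simp only [hd]
      split
      · rfl
      · exact lscLoopA_eq_pairs systemNames stepNumbers hlen (i+1) _
  · rw [List.drop_eq_nil_of_le (by omega), List.zip_nil_left, lscPairsA]
termination_by systemNames.length - i

theorem lscBuild_eq_foldl (systemNames : List String) (stepNumbers : List Int)
    (hlen : systemNames.length ≤ stepNumbers.length) (i : Nat)
    (d : PySem.Dict String (List Int)) :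
    lscBuild systemNames stepNumbers i d =
      ((systemNames.drop i).zip (stepNumbers.drop i)).foldl lscStepB d := by
  rw [lscBuild]
  split
  · rename_i h
    have hi2 : i < stepNumbers.length := lt_of_lt_of_le h hlen
    have hget : PySem.List.pyGet? stepNumbers (i : Int) = some stepNumbers[i] := by
      simp [pysem, hi2]
    rw [hget,
        show systemNames.drop i = systemNames[i] :: systemNames.drop (i+1) from
          (List.getElem_cons_drop h).symm,
        show stepNumbers.drop i = stepNumbers[i] :: stepNumbers.drop (i+1) from
          (List.getElem_cons_drop hi2).symm,
        List.zip_cons_cons, List.foldl_cons]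
    exact lscBuild_eq_foldl systemNames stepNumbers hlen (i+1) _
  · rw [List.drop_eq_nil_of_le (by omega), List.zip_nil_left, List.foldl_nil]
termination_by systemNames.length - i

theorem lscStrictInc_cons_cons (a b : Int) (t : List Int) :
    lscStrictInc (a :: b :: t) = (!(b ≤ a) && lscStrictInc (b :: t)) := rfl

theorem lscStrictInc_of_append (l xs : List Int) (h : lscStrictInc (l ++ xs) = true) :
    lscStrictInc l = true := by
  induction l with
  | nil => rfl
  | cons a t ih =>
    cases t with
    | nil => rfl
    | cons b t' =>
      rw [List.cons_append, List.cons_append, lscStrictInc_cons_cons] at h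
      rw [lscStrictInc_cons_cons]
      simp only [Bool.and_eq_true] at h ⊢
      exact ⟨h.1, ih (by rw [List.cons_append]; exact h.2)⟩

theorem lscStrictInc_snoc_true (l : List Int) (v : Int) (hne : l ≠ [])
    (hlast : l.getLast hne < v) (h : lscStrictInc l = true) :
    lscStrictInc (l ++ [v]) = true := by
  induction l with
  | nil => exact absurd rfl hne
  | cons a t ih =>
    cases t with
    | nil =>
      simp only [List.getLast_singleton] at hlast
      simp [lscStrictInc, not_le.mpr hlast]
    | cons b t' =>
      rw [List.cons_append, List.cons_append, lscStrictInc_cons_cons]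
      rw [lscStrictInc_cons_cons] at h
      simp only [Bool.and_eq_true] at h ⊢
      refine ⟨h.1, ?_⟩
      rw [← List.cons_append]
      exact ih (by simp) (by rw [List.getLast_cons] at hlast; exact hlast) h.2

theorem lscStrictInc_snoc_false (l : List Int) (v : Int) (hne : l ≠ [])
    (hlast : v ≤ l.getLast hne) :
    lscStrictInc (l ++ [v]) = false := by
  induction l with
  | nil => exact absurd rfl hne
  | cons a t ih =>
    cases t with
    | nil =>
      simp only [List.getLast_singleton] at hlast
      simp [lscStrictInc, hlast]
    | cons b t' =>
      rw [List.cons_append, List.cons_append, lscStrictInc_cons_cons]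
      rw [← List.cons_append]
      rw [ih (by simp) (by rw [List.getLast_cons] at hlast; exact hlast)]
      simp

-- an already-broken group stays broken through the rest of B's build pass
theorem lsc_persist (ps : List (String × Int)) :
    ∀ (d : PySem.Dict String (List Int)) (k : String), d.keys.Nodup →
      lscStrictInc (d.getD k []) = false →
      (ps.foldl lscStepB d).values.all lscStrictInc = false := by
  induction ps with
  | nil =>
    intro d k hnd hbad
    have hne : d.getD k [] ≠ [] := by
      intro h0; rw [h0] at hbad; exact absurd hbad (by decide)
    have hsome : d.get? k = some (d.getD k []) := by
      cases hg : d.get? k with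
      | none => exact absurd (PySem.Dict.getD_of_get?_eq_none d [] hg) hne
      | some l => rw [PySem.Dict.getD_of_get?_eq_some d [] hg]
    have hmem : d.getD k [] ∈ d.values := by
      have := PySem.Dict.mem_items_of_get?_eq_some d hsome
      exact List.mem_map_of_mem this
    simp only [List.foldl_nil]
    rw [List.all_eq_false]
    exact ⟨_, hmem, by rw [hbad]; decide⟩
  | cons p ps ih =>
    intro d k hnd hbad
    rw [List.foldl_cons]
    by_cases hk : k = p.1
    · subst hk
      refine ih _ p.1 ?_ ?_
      · exact PySem.Dict.nodup_keys_insert _ _ _ hnd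
      · rw [lscStepB, PySem.Dict.getD_insert, if_pos rfl]
        cases hc : lscStrictInc (d.getD p.1 [] ++ [p.2]) with
        | false => rfl
        | true => exact absurd (lscStrictInc_of_append _ _ hc) (by rw [hbad]; decide)
    · refine ih _ k ?_ ?_
      · exact PySem.Dict.nodup_keys_insert _ _ _ hnd
      · rw [lscStepB, PySem.Dict.getD_insert, if_neg hk]
        exact hbad

-- the invariant: the dict holds nonempty, strictly increasing group lists
theorem lsc_main (ps : List (String × Int)) :
    ∀ (d : PySem.Dict String (List Int)), d.keys.Nodup →
      (∀ k, lscStrictInc (d.getD k []) = true) →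
      (∀ k, d.contains k = true ↔ d.getD k [] ≠ []) →
      lscPairsA ps d = (ps.foldl lscStepB d).values.all lscStrictInc := by
  induction ps with
  | nil =>
    intro d hnd hok _
    rw [List.foldl_nil, lscPairsA, PySem.Dict.values_eq_map_keys d hnd []]
    symm
    rw [List.all_eq_true]
    intro x hx
    rcases List.mem_map.mp hx with ⟨k, -, rfl⟩
    exact hok k
  | cons p ps ih =>
    intro d hnd hok hcont
    obtain ⟨k, v⟩ := p
    rw [List.foldl_cons]
    cases hg : d.get? k with
    | none =>
      have hgetD : d.getD k [] = [] := PySem.Dict.getD_of_get?_eq_none d [] hg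
      have hstep : lscStepB d (k, v) = d.insert k [v] := by
        rw [lscStepB, hgetD, List.nil_append]
      simp only [lscPairsA, hg]
      rw [hstep]
      refine ih _ (PySem.Dict.nodup_keys_insert _ _ _ hnd) ?_ ?_
      · intro k'
        rw [PySem.Dict.getD_insert]
        split
        · rfl
        · exact hok k'
      · intro k'
        rw [PySem.Dict.contains_insert, PySem.Dict.getD_insert]
        by_cases hk : k' = k
        · subst hk; simp
        · rw [if_neg hk]
          simp only [Bool.or_eq_true, beq_iff_eq, hk, false_or]
          exact hcont k'
    | some l =>
      have hgetD : d.getD k [] = l := PySem.Dict.getD_of_get?_eq_some d [] hg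
      have hne : l ≠ [] := by
        have hc : d.contains k = true := by
          rw [PySem.Dict.contains_eq_isSome_get? d k, hg]; rfl
        have := (hcont k).mp hc
        rwa [hgetD] at this
      have hlastEq : PySem.List.pyGetD l (-1) 0 = l.getLast hne := PySem.List.pyGetD_neg_one l 0 hne
      have hstep : lscStepB d (k, v) = d.insert k (l ++ [v]) := by
        rw [lscStepB, hgetD]
      simp only [lscPairsA, hg]
      split
      · rename_i hle
        rw [hlastEq] at hle
        symm
        rw [hstep]
        refine lsc_persist ps _ k (PySem.Dict.nodup_keys_insert _ _ _ hnd) ?_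
        rw [PySem.Dict.getD_insert, if_pos rfl]
        exact lscStrictInc_snoc_false l v hne hle
      · rename_i hgt
        rw [hlastEq] at hgt
        rw [hstep]
        refine ih _ (PySem.Dict.nodup_keys_insert _ _ _ hnd) ?_ ?_
        · intro k'
          rw [PySem.Dict.getD_insert]
          split
          · exact lscStrictInc_snoc_true l v hne (not_le.mp hgt) (by rw [← hgetD]; exact hok k)
          · exact hok k'
        · intro k'
          rw [PySem.Dict.contains_insert, PySem.Dict.getD_insert]
          by_cases hk : k' = k
          · subst hk; simp
          · rw [if_neg hk]
            simp only [Bool.or_eq_true, beq_iff_eq, hk, false_or]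
            exact hcont k'

-- ===== VERDICT (by name: the statement is the Claim_ definition above) =====
theorem launchSequenceChecker_spec : Claim_equal_launchSequenceChecker := by
  intro systemNames stepNumbers _ hpre
  unfold Spec_launchSequenceChecker launchSequenceChecker launchSequenceChecker_alt
  rw [lscLoopA_eq_pairs systemNames stepNumbers hpre 0 _,
      lscBuild_eq_foldl systemNames stepNumbers hpre 0 _]
  simp only [List.drop_zero]
  exact lsc_main _ _ (by simp [PySem.Dict.keys_empty])
    (fun k => by simp [PySem.Dict.getD_empty, lscStrictInc])
    (fun k => by simp [PySem.Dict.contains_empty, PySem.Dict.getD_empty])
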